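-- pv_equiv track=rewrite | github.com/reutDayan1/turbo-fishstick | genetic_algorithm1.py | min_individual
-- ===== SOURCE A (Python) =====
-- def enemy_cost(queens: list, n: int):
--
--     """
--     :param queens:list that describes the location of the queens
--     :param n: list length
--     :return:The number of threats on the board
--     """
--     count = 0
--     for i in range(n):
--         for j in range(i+1,n):
--             if (queens[i] == queens[j]) or (abs(queens[i]-queens[j]) == abs(j-i)):
--                 count += 1
--     return count
--
-- def min_individual(population):
--     """
--
--     :param population: our population
--     :return: the individual with the fewest threats
--     """
--     low_enemy_cost = float('inf')
--     low_enemy = []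
--     for i in population:
--         cost = enemy_cost(i, len(i))
--         if cost < low_enemy_cost:
--             low_enemy_cost = enemy_cost(i, len(i))
--             low_enemy = i[:]
--     return low_enemy
-- ===== SOURCE B (Python) =====
-- def min_individual(population):
--     def conflicts(queens):
--         cols = {}
--         diag1 = {}
--         diag2 = {}
--         total = 0
--         for j, v in enumerate(queens):
--             total += cols.get(v, 0) + diag1.get(v - j, 0) + diag2.get(v + j, 0)
--             cols[v] = cols.get(v, 0) + 1
--             diag1[v - j] = diag1.get(v - j, 0) + 1
--             diag2[v + j] = diag2.get(v + j, 0) + 1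
--         return total
--     return min(population, key=conflicts, default=[])
-- ===== Notes on version B (the rewrite author's own statement) =====
-- stated objective: faster
-- what changed: Replaces the O(n^2) all-pairs conflict scan per individual by a single pass that counts, via three frequency dictionaries (column and the two diagonal keys v-j and v+j), how many earlier queens each queen clashes with, and replaces the manual running-minimum loop by Python's min with a key function.
import Mathlib
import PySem

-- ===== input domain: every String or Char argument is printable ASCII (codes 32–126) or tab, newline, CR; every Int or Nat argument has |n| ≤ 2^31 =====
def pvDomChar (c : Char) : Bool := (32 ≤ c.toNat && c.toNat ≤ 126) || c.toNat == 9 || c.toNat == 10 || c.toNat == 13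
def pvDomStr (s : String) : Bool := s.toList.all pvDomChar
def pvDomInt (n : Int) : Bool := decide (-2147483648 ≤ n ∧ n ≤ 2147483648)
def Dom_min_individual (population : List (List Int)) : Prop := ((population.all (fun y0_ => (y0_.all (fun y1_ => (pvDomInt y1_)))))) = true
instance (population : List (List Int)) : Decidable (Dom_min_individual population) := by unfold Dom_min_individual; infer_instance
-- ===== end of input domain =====

-- B replaces A's all-pairs conflict scan per individual by one pass with three frequency
-- dictionaries (column and the two diagonal keys) and a min-with-key selection; return value only.

-- ===== PORT A =====
def enemy_cost (queens : List Int) (n : Int) : Int :=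
  (PySem.List.pyRange 0 n 1).foldl (fun count i =>
    (PySem.List.pyRange (i + 1) n 1).foldl (fun count j =>
      if PySem.List.pyGetD queens i 0 = PySem.List.pyGetD queens j 0 ∨
         |PySem.List.pyGetD queens i 0 - PySem.List.pyGetD queens j 0| = |j - i|
      then count + 1 else count) count) 0

def min_individual (population : List (List Int)) : List Int :=
  (population.foldl (fun (st : Option Int × List Int) i =>
      let cost := enemy_cost i (PySem.List.len i)
      match st.1 with
      | none => (some (enemy_cost i (PySem.List.len i)), PySem.List.slice i none none)
      | some c =>
        if cost < c then (some (enemy_cost i (PySem.List.len i)), PySem.List.slice i none none)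
        else st)
    (none, [])).2

-- ===== PORT B =====
def conflicts_alt (queens : List Int) : Int :=
  ((PySem.List.enumerate queens).foldl
    (fun (st : (PySem.Dict Int Int × PySem.Dict Int Int × PySem.Dict Int Int) × Int) jv =>
      ((st.1.1.insert jv.2 (st.1.1.getD jv.2 0 + 1),
        st.1.2.1.insert (jv.2 - jv.1) (st.1.2.1.getD (jv.2 - jv.1) 0 + 1),
        st.1.2.2.insert (jv.2 + jv.1) (st.1.2.2.getD (jv.2 + jv.1) 0 + 1)),
       st.2 + st.1.1.getD jv.2 0 + st.1.2.1.getD (jv.2 - jv.1) 0 + st.1.2.2.getD (jv.2 + jv.1) 0))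
    ((PySem.Dict.empty, PySem.Dict.empty, PySem.Dict.empty), 0)).2

def min_individual_alt (population : List (List Int)) : List Int :=
  PySem.List.minD population conflicts_alt []

-- ===== PRECONDITION & SPEC =====
def Spec_min_individual (population : List (List Int)) (out : List Int) : Prop := out = min_individual_alt population
instance (population : List (List Int)) (out : List Int) : Decidable (Spec_min_individual population out) := by unfold Spec_min_individual; infer_instance

-- ===== CLAIM (what is proved, stated in full; the proofs are below) =====
def Claim_equal_min_individual : Prop := ∀ (population : List (List Int)), Dom_min_individual population → Spec_min_individual population (min_individual population)

-- ===== LEMMAS AND PROOFS =====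

-- A's pair condition, on (index, value) entries
abbrev pvCond (e x : Int × Int) : Prop := e.2 = x.2 ∨ |e.2 - x.2| = |x.1 - e.1|

-- the three conflict keys (column, the two diagonals)
def pvK1 (e : Int × Int) : Int := e.2
def pvK2 (e : Int × Int) : Int := e.2 - e.1
def pvK3 (e : Int × Int) : Int := e.2 + e.1

-- number of key-matches of entry e against a list p
def pvM (p : List (Int × Int)) (e : Int × Int) : Int :=
  ((p.map pvK1).count (pvK1 e) : Int) + ((p.map pvK2).count (pvK2 e) : Int) +
    ((p.map pvK3).count (pvK3 e) : Int)

-- prefix-counting total (B's order): each entry of l matched against everything before it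
def pvS : List (Int × Int) → List (Int × Int) → Int
  | _, [] => 0
  | p, e :: l' => pvM p e + pvS (p ++ [e]) l'

-- every entry of l matched against the fixed list p
def pvX (p : List (Int × Int)) : List (Int × Int) → Int
  | [] => 0
  | e :: l' => pvM p e + pvX p l'

-- tail-counting total (A's loop order): each entry matched against the entries after it
def pvT : List (Int × Int) → Int
  | [] => 0
  | e :: l' => ((l'.countP fun x => decide (pvCond e x)) : Int) + pvT l'

-- the counter dictionary built by B's insert loop
def pvCnt (ks : List Int) : PySem.Dict Int Int :=
  ks.foldl (fun d x => d.insert x (d.getD x 0 + 1)) PySem.Dict.empty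

theorem enum_eq (q : List Int) (s : Int) :
    PySem.List.enumerate q s = (List.range q.length).map (fun (k : Nat) => (s + (k : Int), q.getD k 0)) := by
  induction q generalizing s with
  | nil => simp [PySem.List.enumerate]
  | cons x q ih =>
    simp [PySem.List.enumerate, ih, List.range_succ_eq_map, List.map_map, Function.comp]
    intro a _; omega

theorem pvM_append (p r : List (Int × Int)) (e : Int × Int) :
    pvM (p ++ r) e = pvM p e + pvM r e := by
  simp [pvM, List.count_append]; ring

theorem pvX_append_left (p r : List (Int × Int)) (l : List (Int × Int)) :
    pvX (p ++ r) l = pvX p l + pvX r l := by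
  induction l with
  | nil => simp [pvX]
  | cons e l ih => simp [pvX, ih, pvM_append]; ring

theorem pvS_split (l p : List (Int × Int)) : pvS p l = pvX p l + pvS [] l := by
  induction l generalizing p with
  | nil => simp [pvS, pvX]
  | cons e l ih =>
    have h1 := ih (p ++ [e])
    have h2 := ih [e]
    simp only [pvS, pvX, h1, pvX_append_left]
    have : pvM [] e = 0 := by simp [pvM]
    rw [List.nil_append] at *
    omega

theorem pvX_singleton (e : Int × Int) (l : List (Int × Int)) (h : ∀ x ∈ l, e.1 < x.1) :
    ((l.countP fun x => decide (pvCond e x)) : Int) = pvX [e] l := by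
  induction l with
  | nil => simp [pvX]
  | cons x l ih =>
    have hx : e.1 < x.1 := h x (by simp)
    have ih' := ih (fun y hy => h y (by simp [hy]))
    simp only [List.countP_cons, pvX, ← ih']
    have hm : pvM [e] x = if pvCond e x then 1 else 0 := by
      rcases abs_cases (e.2 - x.2) with ⟨h1, h2⟩ | ⟨h1, h2⟩ <;>
        simp [pvM, pvCond, pvK1, pvK2, pvK3, List.count_cons, List.count_nil,
          abs_of_pos (by omega : (0:Int) < x.1 - e.1), h1] <;>
        split_ifs <;> omega
    rw [hm]
    by_cases hc : pvCond e x <;> simp [hc] <;> omega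

theorem pvT_eq_pvS (l : List (Int × Int)) (h : l.Pairwise (fun e x => e.1 < x.1)) :
    pvT l = pvS [] l := by
  induction l with
  | nil => rfl
  | cons e l ih =>
    rcases List.pairwise_cons.mp h with ⟨he, hl⟩
    have hS : pvS [] (e :: l) = pvX [e] l + pvS [] l := by
      show pvM [] e + pvS ([] ++ [e]) l = _
      rw [List.nil_append, pvS_split l [e]]
      have h0 : pvM [] e = 0 := by simp [pvM]
      omega
    rw [hS, pvT, ih hl, pvX_singleton e l he]

theorem enum_pairwise (q : List Int) (s : Int) :
    (PySem.List.enumerate q s).Pairwise (fun e x => e.1 < x.1) := by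
  induction q generalizing s with
  | nil => simp [PySem.List.enumerate]
  | cons x q ih =>
    simp only [PySem.List.enumerate, List.pairwise_cons]
    refine ⟨?_, ih (s + 1)⟩
    intro e he
    have : ∀ (q : List Int) (t : Int) (e : Int × Int), e ∈ PySem.List.enumerate q t → t ≤ e.1 := by
      intro q; induction q with
      | nil => simp [PySem.List.enumerate]
      | cons y q ih2 =>
        intro t e he
        simp only [PySem.List.enumerate, List.mem_cons] at he
        rcases he with rfl | he
        · simp
        · have := ih2 (t + 1) e he; omega
    have := this q (s + 1) e he; omega

theorem pvT_shift (c : Int) (l : List (Int × Int)) :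
    pvT (l.map (fun e => (e.1 + c, e.2))) = pvT l := by
  induction l with
  | nil => rfl
  | cons e l ih =>
    simp only [List.map_cons, pvT, ih, List.countP_map]
    congr 2
    apply List.countP_congr
    intro x _
    have h1 : x.1 + c - (e.1 + c) = x.1 - e.1 := by ring
    simp [Function.comp, pvCond, h1]

theorem enum_shift_one (q : List Int) :
    PySem.List.enumerate q 1 = (PySem.List.enumerate q 0).map (fun e => (e.1 + 1, e.2)) := by
  rw [enum_eq, enum_eq, List.map_map]
  apply List.map_congr_left
  intro k _
  simp [Function.comp]; ring

theorem EC_sum (q : List Int) (n : Int) :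
    enemy_cost q n = ((PySem.List.pyRange 0 n 1).map (fun i =>
      (((PySem.List.pyRange (i + 1) n 1).countP (fun j =>
        decide (PySem.List.pyGetD q i 0 = PySem.List.pyGetD q j 0 ∨
          |PySem.List.pyGetD q i 0 - PySem.List.pyGetD q j 0| = |j - i|))) : Int))).sum := by
  unfold enemy_cost
  simp only [PySem.List.foldl_ite_add_one]
  rw [PySem.List.foldl_add]
  simp

theorem A_val (q : List Int) : enemy_cost q (q.length : Int) = pvT (PySem.List.enumerate q) := by
  induction q with
  | nil => simp [enemy_cost, PySem.List.enumerate, pvT, PySem.List.pyRange_one_eq_nil]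
  | cons x q ih =>
    rw [EC_sum]
    have hlen : ((x :: q).length : Int) = (q.length : Int) + 1 := by simp
    rw [hlen]
    have hsplit : PySem.List.pyRange 0 ((q.length : Int) + 1) 1
        = 0 :: PySem.List.pyRange 1 ((q.length : Int) + 1) 1 :=
      PySem.List.pyRange_one_cons (by positivity)
    rw [hsplit, List.map_cons, List.sum_cons]
    show _ = pvT (PySem.List.enumerate (x :: q) 0)
    have henum : PySem.List.enumerate (x :: q) 0 = (0, x) :: PySem.List.enumerate q 1 := by
      simp [PySem.List.enumerate]
    rw [henum]
    have htail : pvT (PySem.List.enumerate q 1) = pvT (PySem.List.enumerate q 0) := by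
      rw [enum_shift_one, pvT_shift]
    show _ = ((PySem.List.enumerate q 1).countP fun e => decide (pvCond (0, x) e) : Int)
        + pvT (PySem.List.enumerate q 1)
    rw [htail, ← ih, EC_sum]
    have hr1 : PySem.List.pyRange 1 ((q.length : Int) + 1) 1
        = (List.range q.length).map (fun (k : Nat) => 1 + (k : Int)) := by
      rw [PySem.List.pyRange_one]
      have h' : ((q.length : Int) + 1 - 1).toNat = q.length := by omega
      rw [h']
    have hr0 : PySem.List.pyRange 0 ((q.length : Int)) 1
        = (List.range q.length).map (fun (k : Nat) => 0 + (k : Int)) := by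
      rw [PySem.List.pyRange_one]
      have h' : ((q.length : Int) - 0).toNat = q.length := by omega
      rw [h']
    congr 1
    · have h01 : (0 : Int) + 1 = 1 := by norm_num
      rw [h01, hr1, enum_eq, List.countP_map, List.countP_map]
      congr 1
      apply List.countP_congr
      intro k hk
      have h0 : PySem.List.pyGetD (x :: q) (0 : Int) 0 = x := by
        simp [PySem.List.pyGetD_zero_cons]
      have h1 : PySem.List.pyGetD (x :: q) (1 + (k : Int)) 0 = q.getD k 0 := by
        have : (1 + (k : Int)) = ((k + 1 : Nat) : Int) := by push_cast; ring
        rw [this, PySem.List.pyGetD_natCast]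
        simp
      simp [Function.comp, pvCond, h0, h1]
    · rw [hr1, hr0, List.map_map, List.map_map]
      apply congrArg List.sum
      apply List.map_congr_left
      intro k hk
      simp only [Function.comp]
      congr 1
      have hr2 : PySem.List.pyRange (1 + (k : Int) + 1) ((q.length : Int) + 1) 1
          = (List.range (q.length - k - 1)).map (fun (t : Nat) => 1 + (k : Int) + 1 + (t : Int)) := by
        rw [PySem.List.pyRange_one]
        simp only [List.mem_range] at hk
        have h' : ((q.length : Int) + 1 - (1 + (k : Int) + 1)).toNat = q.length - k - 1 := by omega
        rw [h']
      have hr3 : PySem.List.pyRange (0 + (k : Int) + 1) ((q.length : Int)) 1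
          = (List.range (q.length - k - 1)).map (fun (t : Nat) => 0 + (k : Int) + 1 + (t : Int)) := by
        rw [PySem.List.pyRange_one]
        simp only [List.mem_range] at hk
        have h' : ((q.length : Int) - (0 + (k : Int) + 1)).toNat = q.length - k - 1 := by omega
        rw [h']
      rw [hr2, hr3, List.countP_map, List.countP_map]
      apply List.countP_congr
      intro t ht
      have e1 : PySem.List.pyGetD (x :: q) (1 + (k : Int)) 0 = PySem.List.pyGetD q ((k : Int)) 0 := by
        have : (1 + (k : Int)) = ((k + 1 : Nat) : Int) := by push_cast; ring
        rw [this, PySem.List.pyGetD_natCast, PySem.List.pyGetD_natCast]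
        simp
      have e2 : PySem.List.pyGetD (x :: q) (1 + (k : Int) + 1 + (t : Int)) 0
          = PySem.List.pyGetD q ((k : Int) + 1 + (t : Int)) 0 := by
        have ha : (1 + (k : Int) + 1 + (t : Int)) = ((k + 1 + t + 1 : Nat) : Int) := by push_cast; ring
        have hb : ((k : Int) + 1 + (t : Int)) = ((k + 1 + t : Nat) : Int) := by push_cast; ring
        rw [ha, hb, PySem.List.pyGetD_natCast, PySem.List.pyGetD_natCast]
        simp
      have e0 : PySem.List.pyGetD q (0 + (k : Int)) 0 = PySem.List.pyGetD q ((k : Int)) 0 := by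
        norm_num
      have habs : 1 + (k : Int) + 1 + (t : Int) - (1 + (k : Int))
          = 0 + (k : Int) + 1 + (t : Int) - (0 + (k : Int)) := by ring
      have e2' : PySem.List.pyGetD q ((k : Int) + 1 + (t : Int)) 0
          = PySem.List.pyGetD q (0 + (k : Int) + 1 + (t : Int)) 0 := by norm_num
      simp only [Function.comp, e1, e2, e0, e2', habs]

theorem getD_pvCnt (ks : List Int) (v : Int) : (pvCnt ks).getD v 0 = (ks.count v : Int) := by
  simp [pvCnt, PySem.Dict.getD_foldl_insert_add_one]

theorem pvCnt_append (ks : List Int) (v : Int) :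
    pvCnt (ks ++ [v]) = (pvCnt ks).insert v ((pvCnt ks).getD v 0 + 1) := by
  simp [pvCnt, List.foldl_append]

theorem B_fold (l p : List (Int × Int)) (acc : Int) :
    (l.foldl
      (fun (st : (PySem.Dict Int Int × PySem.Dict Int Int × PySem.Dict Int Int) × Int) jv =>
        ((st.1.1.insert jv.2 (st.1.1.getD jv.2 0 + 1),
          st.1.2.1.insert (jv.2 - jv.1) (st.1.2.1.getD (jv.2 - jv.1) 0 + 1),
          st.1.2.2.insert (jv.2 + jv.1) (st.1.2.2.getD (jv.2 + jv.1) 0 + 1)),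
         st.2 + st.1.1.getD jv.2 0 + st.1.2.1.getD (jv.2 - jv.1) 0 + st.1.2.2.getD (jv.2 + jv.1) 0))
      ((pvCnt (p.map pvK1), pvCnt (p.map pvK2), pvCnt (p.map pvK3)), acc)).2 = acc + pvS p l := by
  induction l generalizing p acc with
  | nil => simp [pvS]
  | cons e l ih =>
    simp only [List.foldl_cons]
    have hk1 : (pvCnt (p.map pvK1)).insert e.2 ((pvCnt (p.map pvK1)).getD e.2 0 + 1)
        = pvCnt ((p ++ [e]).map pvK1) := by
      rw [List.map_append]; simp [pvCnt_append, pvK1]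
    have hk2 : (pvCnt (p.map pvK2)).insert (e.2 - e.1) ((pvCnt (p.map pvK2)).getD (e.2 - e.1) 0 + 1)
        = pvCnt ((p ++ [e]).map pvK2) := by
      rw [List.map_append]; simp [pvCnt_append, pvK2]
    have hk3 : (pvCnt (p.map pvK3)).insert (e.2 + e.1) ((pvCnt (p.map pvK3)).getD (e.2 + e.1) 0 + 1)
        = pvCnt ((p ++ [e]).map pvK3) := by
      rw [List.map_append]; simp [pvCnt_append, pvK3]
    rw [hk1, hk2, hk3, ih (p ++ [e])]
    simp only [pvS, getD_pvCnt]
    have : pvM p e = ((p.map pvK1).count e.2 : Int) + ((p.map pvK2).count (e.2 - e.1) : Int)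
        + ((p.map pvK3).count (e.2 + e.1) : Int) := by
      simp [pvM, pvK1, pvK2, pvK3]
    omega

theorem B_val (q : List Int) : conflicts_alt q = pvS [] (PySem.List.enumerate q) := by
  have h := B_fold (PySem.List.enumerate q) [] 0
  simp only [List.map_nil, pvCnt, List.foldl_nil, zero_add] at h
  unfold conflicts_alt
  exact h

theorem cost_eq (q : List Int) : enemy_cost q (PySem.List.len q) = conflicts_alt q := by
  rw [PySem.List.len_eq, A_val q, pvT_eq_pvS _ (enum_pairwise q 0), ← B_val q]

theorem Afold (kA kB : List Int → Int) (h : ∀ y, kA y = kB y) (l : List (List Int)) (m : List Int) :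
    l.foldl (fun (st : Option Int × List Int) i =>
      let cost := kA i
      match st.1 with
      | none => (some (kA i), PySem.List.slice i none none)
      | some c => if cost < c then (some (kA i), PySem.List.slice i none none) else st)
      (some (kA m), m)
    = (some (kA (l.foldl (fun mm x => if kB x < kB mm then x else mm) m)),
       l.foldl (fun mm x => if kB x < kB mm then x else mm) m) := by
  induction l generalizing m with
  | nil => simp
  | cons x l ih =>
    rw [List.foldl_cons, List.foldl_cons]
    change List.foldl _ (if kA x < kA m then (some (kA x), PySem.List.slice x none none)
        else (some (kA m), m)) l = _
    by_cases hc : kB x < kB m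
    · have hc' : kA x < kA m := by rw [h x, h m]; exact hc
      rw [if_pos hc', if_pos hc, PySem.List.slice_none_none]
      exact ih x
    · have hc' : ¬ kA x < kA m := by rw [h x, h m]; exact hc
      rw [if_neg hc', if_neg hc]
      exact ih m

theorem min?_cons (kB : List Int → Int) (l : List (List Int)) (m : List Int) :
    PySem.List.min? (m :: l) kB
      = some (l.foldl (fun mm x => if kB x < kB mm then x else mm) m) := by
  induction l generalizing m with
  | nil => rfl
  | cons x l ih =>
    have key : PySem.List.min? (m :: x :: l) kB
        = PySem.List.min? ((if kB x < kB m then x else m) :: l) kB := by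
      by_cases hc : kB x < kB m <;> simp [PySem.List.min?, hc]
    rw [key, List.foldl_cons]
    exact ih (if kB x < kB m then x else m)

theorem sel_eq (population : List (List Int)) :
    min_individual population = min_individual_alt population := by
  cases population with
  | nil => rfl
  | cons x pop =>
    unfold min_individual min_individual_alt PySem.List.minD
    rw [List.foldl_cons]
    change (List.foldl _ (some (enemy_cost x (PySem.List.len x)), PySem.List.slice x none none) pop).2
        = (PySem.List.min? (x :: pop) conflicts_alt).getD []
    rw [PySem.List.slice_none_none,
      Afold (fun y => enemy_cost y (PySem.List.len y)) conflicts_alt cost_eq pop x,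
      min?_cons conflicts_alt pop x]
    rfl

-- ===== VERDICT (by name: the statement is the Claim_ definition above) =====
theorem min_individual_spec : Claim_equal_min_individual := by
  intro population _
  unfold Spec_min_individual
  exact sel_eq population
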